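-- pv_equiv track=rewrite | github.com/luotong1995/leetcode | algorithm/binary_search/1170numSmallerByFrequency/main.py | f
-- ===== SOURCE A (Python) =====
-- def f(x):
--     x.sort()
--     count = 1
--     cur = x[0]
--     for i in range(1, len(x)):
--         if x[i] != cur:
--             break
--         count += 1
--
--     return count
-- ===== SOURCE B (Python) =====
-- import bisect
--
-- def f(x):
--     x.sort()
--     return bisect.bisect_right(x, x[0])
-- ===== Notes on version B (the rewrite author's own statement) =====
-- stated objective: idiomatic
-- what changed: After the same in-place sort, B replaces A's explicit linear run-counting loop over indices with a stdlib binary search (bisect.bisect_right) for the right boundary of the smallest element.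
import Mathlib
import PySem

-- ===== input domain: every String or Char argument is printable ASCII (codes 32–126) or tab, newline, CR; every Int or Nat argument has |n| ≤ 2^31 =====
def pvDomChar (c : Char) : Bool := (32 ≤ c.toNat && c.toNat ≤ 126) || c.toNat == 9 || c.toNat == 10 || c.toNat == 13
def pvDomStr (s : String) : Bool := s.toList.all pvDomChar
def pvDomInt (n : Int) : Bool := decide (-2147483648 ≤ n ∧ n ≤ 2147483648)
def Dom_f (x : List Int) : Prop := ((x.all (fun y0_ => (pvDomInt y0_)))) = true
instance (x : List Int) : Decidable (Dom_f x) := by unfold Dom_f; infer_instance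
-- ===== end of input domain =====

-- B keeps A's in-place x.sort() but counts the multiplicity of the minimum with a stdlib
-- binary search (bisect.bisect_right) instead of A's explicit linear scan with break (idiomatic).
-- Both A and B sort x in place; the equivalence proved here is about the return value.

-- ===== PORT A =====
-- A's loop: for i in range(1, len(x)): if x[i] != cur: break; count += 1
def fGo (s : List Int) (cur : Int) : List Int → Int → Int
  | [], count => count
  | i :: rest, count =>
    if PySem.List.pyGetD s i 0 ≠ cur then count
    else fGo s cur rest (count + 1)

def f (x : List Int) : Int :=
  let s := PySem.List.sorted x (fun v => v) false
  let cur := PySem.List.pyGetD s 0 0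
  fGo s cur (PySem.List.pyRange 1 (s.length : Int) 1) 1

-- ===== PORT B =====
def f_alt (x : List Int) : Int :=
  let s := PySem.List.sorted x (fun v => v) false
  (PySem.List.bisectRight s (PySem.List.pyGetD s 0 0) : Int)

-- ===== PRECONDITION & SPEC =====
-- Pre_ excludes the empty list, on which both A and B raise IndexError indexing the first element.
def Pre_f (x : List Int) : Prop := x ≠ []
instance (x : List Int) : Decidable (Pre_f x) := by unfold Pre_f; infer_instance
def pvWitness_f : List Int := [3, 1, 1, 2]

def Spec_f (x : List Int) (out : Int) : Prop := out = f_alt x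
instance (x : List Int) (out : Int) : Decidable (Spec_f x out) := by unfold Spec_f; infer_instance

-- ===== CLAIM (what is proved, stated in full; the proofs are below) =====
def Claim_equal_f : Prop := ∀ (x : List Int), Dom_f x → Pre_f x → Spec_f x (f x)

-- ===== LEMMAS AND PROOFS =====

-- A's scan over indices j..n-1: with hP characterising the run of the minimum as the
-- first m positions, the scan adds (max m j - j) to count.
theorem fGo_range (k : Nat) : ∀ (s : List Int) (c : Int) (m : Nat) (count : Int) (j : Nat),
    m ≤ s.length → j ≤ s.length → s.length - j = k →
    (∀ i (hi : i < s.length), s[i] = c ↔ i < m) →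
    fGo s c (PySem.List.pyRange (j : Int) (s.length : Int) 1) count
      = count + ((max m j - j : Nat) : Int) := by
  induction k with
  | zero =>
    intro s c m count j hm hj hk hP
    have hjn : j = s.length := by omega
    rw [PySem.List.pyRange_one_eq_nil (by exact_mod_cast le_of_eq hjn.symm)]
    have : max m j = j := Nat.max_eq_right (by omega)
    simp [fGo, this]
  | succ k ih =>
    intro s c m count j hm hj hk hP
    have hjn : j < s.length := by omega
    rw [PySem.List.pyRange_one_cons (by exact_mod_cast hjn)]
    have hget : PySem.List.pyGetD s (j : Int) 0 = s[j] := by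
      rw [PySem.List.pyGetD_natCast]
      exact List.getD_eq_getElem s 0 hjn
    by_cases hlt : j < m
    · have hc : s[j] = c := (hP j hjn).2 hlt
      have : ((j : Int) + 1) = ((j + 1 : Nat) : Int) := by push_cast; ring
      rw [fGo, if_neg (by simp [hget, hc]), this,
        ih s c m (count + 1) (j + 1) hm (by omega) (by omega) hP]
      have h1 : max m (j + 1) = m := Nat.max_eq_left (by omega)
      have h2 : max m j = m := Nat.max_eq_left (by omega)
      rw [h1, h2]
      have e1 : ((m - (j + 1) : Nat) : Int) = (m : Int) - (j : Int) - 1 := by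
        omega
      have e2 : ((m - j : Nat) : Int) = (m : Int) - (j : Int) := by omega
      rw [e1, e2]; ring
    · have hc : s[j] ≠ c := fun h => hlt ((hP j hjn).1 h)
      rw [fGo, if_pos (by simp [hget, hc])]
      have : max m j = j := Nat.max_eq_right (by omega)
      simp [this]

theorem f_eq_f_alt (x : List Int) (hx : x ≠ []) : f x = f_alt x := by
  set s := PySem.List.sorted x (fun v => v) false with hs
  set c := PySem.List.pyGetD s 0 0 with hcdef
  show fGo s c (PySem.List.pyRange 1 (s.length : Int) 1) 1
      = ((PySem.List.bisectRight s c : Nat) : Int)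
  have hsne : s ≠ [] := by
    rw [hs]; simpa [PySem.List.sorted_eq_nil_iff] using hx
  have hn : 0 < s.length := List.length_pos_iff.mpr hsne
  have hc : c = s[0] := by
    rw [hcdef, show (0 : Int) = ((0 : Nat) : Int) by norm_num, PySem.List.pyGetD_natCast]
    exact List.getD_eq_getElem s 0 hn
  have hpw : List.Pairwise (fun a b => a ≤ b) s := by
    simpa using PySem.List.sorted_pairwise x (fun v => v)
  obtain ⟨hm1, hm2, hm3⟩ := PySem.List.bisectRight_spec s c hpw
  set m := PySem.List.bisectRight s c with hmdef
  have hmono : ∀ i (hi : i < s.length), s[0] ≤ s[i] := by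
    intro i hi
    exact PySem.List.sorted_id_getElem_mono x (Nat.zero_le i) hi
  have hm0 : 1 ≤ m := by
    by_contra h
    have h0 : m ≤ 0 := by omega
    have := hm3 0 hn h0
    rw [hc] at this
    omega
  have hP : ∀ i (hi : i < s.length), s[i] = c ↔ i < m := by
    intro i hi
    constructor
    · intro hic
      by_contra h
      have := hm3 i hi (by omega)
      omega
    · intro him
      have h1 := hm2 i hi him
      have h2 := hmono i hi
      rw [← hc] at h2
      omega
  have hkey := fGo_range (s.length - 1) s c m 1 1 hm1 hn (by omega) hP
  rw [show ((1 : Nat) : Int) = (1 : Int) by norm_num] at hkey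
  rw [hkey, Nat.max_eq_left hm0]
  omega

-- ===== VERDICT (by name: the statement is the Claim_ definition above) =====
theorem f_spec : Claim_equal_f := by
  intro x _ hpre
  unfold Spec_f
  exact f_eq_f_alt x hpre
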